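-- pv_equiv track=rewrite | github.com/jitani04/Graph_Theory | graphs.py | compute_social_cost
-- ===== SOURCE A (Python) =====
-- def compute_social_cost(pattern):
--     """
--     Compute the social optimality cost of the traffic pattern.
--     """
--     n = len(pattern)
--     min_cost = float('inf')
--     best_x = 0
--     best_y = 0
--
--     for x in range(n + 1):
--         for y in range(n + 1):
--             cost = x + (n - x) + (x - y) + (n - x + y)
--             if cost < min_cost:
--                 min_cost = cost
--                 best_x = x
--                 best_y = y
--
--     return min_cost, best_x, best_y
-- ===== SOURCE B (Python) =====
-- def compute_social_cost(pattern):
--     # The cost x + (n-x) + (x-y) + (n-x+y) equals 2n for every x, y,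
--     # so the first grid point x = y = 0 is already minimal.
--     n = len(pattern)
--     return 2 * n, 0, 0
-- ===== Notes on version B (the rewrite author's own statement) =====
-- stated objective: faster
-- what changed: Replaced the O(n^2) grid search by the closed form: the cost expression simplifies to the constant 2n, so the minimum is 2n attained first at x = y = 0.
import Mathlib
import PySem

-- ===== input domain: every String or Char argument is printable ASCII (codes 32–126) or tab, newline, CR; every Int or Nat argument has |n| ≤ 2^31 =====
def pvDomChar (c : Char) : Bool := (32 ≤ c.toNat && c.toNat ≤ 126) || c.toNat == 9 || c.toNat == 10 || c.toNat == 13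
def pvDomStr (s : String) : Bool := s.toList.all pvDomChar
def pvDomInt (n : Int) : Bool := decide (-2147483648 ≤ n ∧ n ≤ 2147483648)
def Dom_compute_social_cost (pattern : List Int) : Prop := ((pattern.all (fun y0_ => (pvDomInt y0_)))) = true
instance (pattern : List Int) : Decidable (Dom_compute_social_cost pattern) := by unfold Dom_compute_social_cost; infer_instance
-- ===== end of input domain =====

-- B replaces A's O(n^2) grid search by the closed form (2n, 0, 0): the cost
-- expression is constant in x and y, so the first grid point is minimal.

-- ===== PORT A =====
-- the loop state: (min_cost as Option Int with none = float('inf'), best_x, best_y)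
def cscStep (n x : Int) (st : Option Int × Int × Int) (y : Int) : Option Int × Int × Int :=
  let cost := x + (n - x) + (x - y) + (n - x + y)
  match st with
  | (none, _, _) => (some cost, x, y)          -- cost < inf always
  | (some m, bx, by') => if cost < m then (some cost, x, y) else (some m, bx, by')

def compute_social_cost (pattern : List Int) : Int × Int × Int :=
  let n : Int := pattern.length
  let st := (PySem.List.pyRange 0 (n + 1) 1).foldl
    (fun st x => (PySem.List.pyRange 0 (n + 1) 1).foldl (cscStep n x) st)
    (none, 0, 0)
  match st with
  | (some m, bx, by') => (m, bx, by')
  | (none, bx, by') => (0, bx, by')            -- unreachable: range(n+1) is nonempty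

-- ===== PORT B =====
def compute_social_cost_alt (pattern : List Int) : Int × Int × Int :=
  (2 * (pattern.length : Int), 0, 0)

-- ===== PRECONDITION & SPEC =====
def Spec_compute_social_cost (pattern : List Int) (out : Int × Int × Int) : Prop := out = compute_social_cost_alt pattern
instance (pattern : List Int) (out : Int × Int × Int) : Decidable (Spec_compute_social_cost pattern out) := by unfold Spec_compute_social_cost; infer_instance

-- ===== CLAIM (what is proved, stated in full; the proofs are below) =====
def Claim_equal_compute_social_cost : Prop := ∀ (pattern : List Int), Dom_compute_social_cost pattern → Spec_compute_social_cost pattern (compute_social_cost pattern)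

-- ===== LEMMAS AND PROOFS =====

-- one step never moves off the fixed point (some (2n), bx, by)
theorem cscStep_fixed (n x bx by' y : Int) :
    cscStep n x (some (2 * n), bx, by') y = (some (2 * n), bx, by') := by
  simp only [cscStep]
  have h : x + (n - x) + (x - y) + (n - x + y) = 2 * n := by ring
  rw [h]
  simp

-- an inner fold from the fixed point stays there (any list of y's)
theorem inner_fixed (n x bx by' : Int) (ys : List Int) :
    ys.foldl (cscStep n x) (some (2 * n), bx, by') = (some (2 * n), bx, by') := by
  induction ys with
  | nil => rfl
  | cons y ys ih => simp [List.foldl, cscStep_fixed, ih]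

-- first step from the 'inf' state
theorem cscStep_none (n x b1 b2 y : Int) :
    cscStep n x (none, b1, b2) y = (some (2 * n), x, y) := by
  simp only [cscStep]
  have h : x + (n - x) + (x - y) + (n - x + y) = 2 * n := by ring
  rw [h]

-- the outer fold (inner loop unfolded one step) from the fixed point stays there
theorem outer_fixed (n bx by' : Int) (ys xs : List Int) :
    xs.foldl (fun st x => ys.foldl (cscStep n x) (cscStep n x st 0)) (some (2 * n), bx, by')
      = (some (2 * n), bx, by') := by
  induction xs with
  | nil => rfl
  | cons x xs ih => simp [List.foldl, cscStep_fixed, inner_fixed, ih]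

-- ===== VERDICT (by name: the statement is the Claim_ definition above) =====
theorem compute_social_cost_spec : Claim_equal_compute_social_cost := by
  intro pattern _
  unfold Spec_compute_social_cost
  simp only [compute_social_cost, compute_social_cost_alt]
  have hn : (0 : Int) < (pattern.length : Int) + 1 := by positivity
  rw [PySem.List.pyRange_one_cons hn]
  simp only [List.foldl_cons]
  rw [cscStep_none, inner_fixed, outer_fixed]
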